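-- pv_equiv track=rewrite | github.com/iofbim/ifcClass-uniClass | etl/etl_map.py | facet_from_filename
-- ===== SOURCE A (Python) =====
-- from typing import Dict, List, Tuple, Optional
--
-- FACETS: Tuple[str, ...] = (
--     "EF",
--     "SS",
--     "PR",
--     "TE",
--     "PM",
--     "AC",
--     "EN",
--     "SL",
--     "RO",
--     "CO",
--     "MA",
--     "FI",
--     "PC",
--     "RK",
--     "ZZ",
-- )
--
-- def facet_from_filename(name: str) -> Optional[str]:
--     """Best-effort facet extraction from a Uniclass filename stem."""
--     if not name:
--         return None
--     up = name.upper()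
--     # Prefer exact token matches such as `_PR_` or prefix/suffix forms like `PR_`
--     for fac in FACETS:
--         token = f"_{fac}_"
--         if token in up:
--             return fac
--         if up.startswith(f"{fac}_") or up.endswith(f"_{fac}"):
--             return fac
--     # Fall back to any substring hit
--     for fac in FACETS:
--         if fac in up:
--             return fac
--     return None
-- ===== SOURCE B (Python) =====
-- from typing import Optional, Tuple
--
-- FACETS: Tuple[str, ...] = (
--     "EF", "SS", "PR", "TE", "PM", "AC", "EN", "SL", "RO",
--     "CO", "MA", "FI", "PC", "RK", "ZZ",
-- )
--
-- def facet_from_filename(name: str) -> Optional[str]: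
--     """Single pass: first strong (token/prefix/suffix) match wins outright;
--     otherwise the first plain-substring hit, recorded as a fallback."""
--     up = name.upper()
--     fallback = None
--     for fac in FACETS:
--         if f"_{fac}_" in up or up.startswith(f"{fac}_") or up.endswith(f"_{fac}"):
--             return fac
--         if fallback is None and fac in up:
--             fallback = fac
--     return fallback
-- ===== Notes on version B (the rewrite author's own statement) =====
-- stated objective: simpler
-- what changed: Replaces A's two sequential scans of FACETS (strong matches, then a weak-substring rescan) with one single pass that returns the first strong match immediately and records the first weak hit as a fallback; the explicit empty-name guard disappears.
import Mathlib
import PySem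

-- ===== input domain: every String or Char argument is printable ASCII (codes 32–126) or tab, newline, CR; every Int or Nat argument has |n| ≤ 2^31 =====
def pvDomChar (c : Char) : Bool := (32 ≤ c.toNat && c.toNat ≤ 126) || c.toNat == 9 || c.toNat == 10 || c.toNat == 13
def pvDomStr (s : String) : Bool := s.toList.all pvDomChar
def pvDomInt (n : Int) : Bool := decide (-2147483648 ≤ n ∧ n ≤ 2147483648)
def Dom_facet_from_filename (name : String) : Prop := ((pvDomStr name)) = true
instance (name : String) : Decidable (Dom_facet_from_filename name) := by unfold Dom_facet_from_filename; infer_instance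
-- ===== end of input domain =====

-- B replaces A's two sequential scans of FACETS with one pass (first strong match
-- returns at once; the first weak substring hit is kept as a fallback): simpler, one traversal.

-- ===== PORT A =====
def pvFacets : List (List Char) :=
  ["EF".toList, "SS".toList, "PR".toList, "TE".toList, "PM".toList, "AC".toList,
   "EN".toList, "SL".toList, "RO".toList, "CO".toList, "MA".toList, "FI".toList,
   "PC".toList, "RK".toList, "ZZ".toList]

-- first loop of A: token `_fac_` in up, or up.startswith(`fac_`), or up.endswith(`_fac`)
def pvLoopA1 (up : List Char) : List (List Char) → Option String
  | [] => none
  | fac :: rest =>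
    if PySem.Chars.isIn ('_' :: fac ++ ['_']) up then some (String.ofList fac)
    else if PySem.Chars.startswith up (fac ++ ['_']) || PySem.Chars.endswith up ('_' :: fac) then
      some (String.ofList fac)
    else pvLoopA1 up rest

-- second loop of A: any substring hit
def pvLoopA2 (up : List Char) : List (List Char) → Option String
  | [] => none
  | fac :: rest =>
    if PySem.Chars.isIn fac up then some (String.ofList fac) else pvLoopA2 up rest

def facet_from_filename (name : String) : Option String :=
  if name.toList = [] then none
  else
    let up := PySem.Chars.upper name.toList
    match pvLoopA1 up pvFacets with
    | some f => some f
    | none => pvLoopA2 up pvFacets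

-- ===== PORT B =====
def pvStrong (up fac : List Char) : Bool :=
  PySem.Chars.isIn ('_' :: fac ++ ['_']) up ||
  PySem.Chars.startswith up (fac ++ ['_']) ||
  PySem.Chars.endswith up ('_' :: fac)

def pvLoopB (up : List Char) : List (List Char) → Option String → Option String
  | [], fb => fb
  | fac :: rest, fb =>
    if pvStrong up fac then some (String.ofList fac)
    else pvLoopB up rest
      (if fb.isNone && PySem.Chars.isIn fac up then some (String.ofList fac) else fb)

def facet_from_filename_alt (name : String) : Option String :=
  pvLoopB (PySem.Chars.upper name.toList) pvFacets none

-- ===== PRECONDITION & SPEC =====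
def Spec_facet_from_filename (name : String) (out : Option String) : Prop := out = facet_from_filename_alt name
instance (name : String) (out : Option String) : Decidable (Spec_facet_from_filename name out) := by unfold Spec_facet_from_filename; infer_instance

-- ===== CLAIM (what is proved, stated in full; the proofs are below) =====
def Claim_equal_facet_from_filename : Prop := ∀ (name : String), Dom_facet_from_filename name → Spec_facet_from_filename name (facet_from_filename name)

-- ===== LEMMAS AND PROOFS =====

-- if A's first loop finds a strong match, B returns the same facet regardless of the fallback
theorem pvLoopB_of_strong (up : List Char) (l : List (List Char)) (f : String)
    (h : pvLoopA1 up l = some f) : ∀ fb, pvLoopB up l fb = some f := by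
  induction l with
  | nil => simp [pvLoopA1] at h
  | cons fac rest ih =>
    intro fb
    by_cases h1 : PySem.Chars.isIn ('_' :: fac ++ ['_']) up = true
    · simp only [pvLoopA1, if_pos h1] at h
      simp only [pvLoopB, pvStrong]
      rw [if_pos (by simp at h1 ⊢; tauto)]
      exact h
    · by_cases h2 : (PySem.Chars.startswith up (fac ++ ['_']) || PySem.Chars.endswith up ('_' :: fac)) = true
      · simp only [pvLoopA1, if_neg h1] at h
        rw [if_pos (by simpa using h2)] at h
        simp only [pvLoopB, pvStrong]
        rw [if_pos (by simp at h1 h2 ⊢; tauto)]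
        exact h
      · simp only [pvLoopA1, if_neg h1] at h
        rw [if_neg (by simpa using h2)] at h
        simp only [pvLoopB, pvStrong]
        rw [if_neg (by simp at h1 h2 ⊢; tauto)]
        exact ih h _

-- if A's first loop finds nothing, B returns the fallback if set, else A's second loop's result
theorem pvLoopB_of_weak (up : List Char) (l : List (List Char))
    (h : pvLoopA1 up l = none) : ∀ fb, pvLoopB up l fb = fb.or (pvLoopA2 up l) := by
  induction l with
  | nil => intro fb; cases fb <;> simp [pvLoopB, pvLoopA2]
  | cons fac rest ih =>
    intro fb
    by_cases h1 : PySem.Chars.isIn ('_' :: fac ++ ['_']) up = true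
    · simp only [pvLoopA1, if_pos h1] at h
      exact absurd h (by simp)
    · by_cases h2 : (PySem.Chars.startswith up (fac ++ ['_']) || PySem.Chars.endswith up ('_' :: fac)) = true
      · simp only [pvLoopA1, if_neg h1] at h
        rw [if_pos (by simpa using h2)] at h
        exact absurd h (by simp)
      · simp only [pvLoopA1, if_neg h1] at h
        rw [if_neg (by simpa using h2)] at h
        simp only [pvLoopB, pvStrong]
        rw [if_neg (by simp at h1 h2 ⊢; tauto)]
        cases fb with
        | some x => simpa using ih h (some x)
        | none =>
          by_cases hw : PySem.Chars.isIn fac up = true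
          · rw [if_pos (by simp [hw])]
            rw [ih h (some (String.ofList fac))]
            simp [pvLoopA2, hw]
          · rw [if_neg (by simp [hw])]
            rw [ih h none]
            simp [pvLoopA2, hw]

-- ===== VERDICT (by name: the statement is the Claim_ definition above) =====
theorem facet_from_filename_spec : Claim_equal_facet_from_filename := by
  intro name _
  unfold Spec_facet_from_filename facet_from_filename facet_from_filename_alt
  by_cases hn : name.toList = []
  · rw [if_pos hn, hn]
    decide
  · rw [if_neg hn]
    show (match pvLoopA1 (PySem.Chars.upper name.toList) pvFacets with
          | some f => some f
          | none => pvLoopA2 (PySem.Chars.upper name.toList) pvFacets) = _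
    cases h1 : pvLoopA1 (PySem.Chars.upper name.toList) pvFacets with
    | some f => exact (pvLoopB_of_strong _ _ _ h1 none).symm
    | none => simpa using (pvLoopB_of_weak _ _ h1 none).symm
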